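-- pv_equiv track=rewrite | github.com/TempeHS/2026SE1.Lucas.Z_Learn_Python | 2-Loops/plates/plates.py | Alpha_After_Digits
-- ===== SOURCE A (Python) =====
-- def Alpha_After_Digits(s):
--     digit_found = False
--     for char in s:
--         if char.isdigit():
--             digit_found = True
--         elif digit_found and char.isalpha():
--             return False
--     return True
-- ===== SOURCE B (Python) =====
-- def Alpha_After_Digits(s):
--     tags = [c.isdigit() for c in s if c.isalpha() or c.isdigit()]
--     return tags == sorted(tags)
-- ===== Notes on version B (the rewrite author's own statement) =====
-- stated objective: alternative
-- what changed: Instead of a flag-carrying scan, B classifies each alphanumeric character as a boolean tag (digit=True, letter=False) and returns whether the tag list equals its sorted version, i.e. is nondecreasing.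
import Mathlib
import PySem

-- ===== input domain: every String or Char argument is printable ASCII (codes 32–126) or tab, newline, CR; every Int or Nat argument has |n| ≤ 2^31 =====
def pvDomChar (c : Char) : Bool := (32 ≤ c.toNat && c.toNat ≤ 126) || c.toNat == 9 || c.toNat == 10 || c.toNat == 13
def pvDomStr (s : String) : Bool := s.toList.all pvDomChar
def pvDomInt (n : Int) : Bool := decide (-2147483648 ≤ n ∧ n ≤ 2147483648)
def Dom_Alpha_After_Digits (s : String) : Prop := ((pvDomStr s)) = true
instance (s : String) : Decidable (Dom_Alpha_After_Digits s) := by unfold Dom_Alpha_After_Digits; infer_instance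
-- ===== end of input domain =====

-- B classifies each alphanumeric character as a digit/letter boolean tag and returns
-- whether the tag list equals its sorted version, instead of A's flag-carrying scan
-- (alternative algorithm, not claimed faster).


-- ===== PORT A =====
-- A's loop: carry the digit_found flag over the characters.
def pvGoA : List Char → Bool → Bool
  | [], _ => true
  | c :: rest, df =>
    if PySem.Chars.isdigit c then pvGoA rest true
    else if df && PySem.Chars.isalpha c then false
    else pvGoA rest df

def Alpha_After_Digits (s : String) : Bool := pvGoA s.toList false

-- ===== PORT B =====
-- B: tag each alphanumeric char (digit = true, letter = false); the string is fine
-- iff the tag list is already sorted (no letter-tag after a digit-tag).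
def pvTags (s : String) : List Bool :=
  (s.toList.filter (fun c => PySem.Chars.isalpha c || PySem.Chars.isdigit c)).map
    (fun c => PySem.Chars.isdigit c)

def Alpha_After_Digits_alt (s : String) : Bool :=
  pvTags s == PySem.List.sorted (pvTags s) (fun b => b) false

-- ===== PRECONDITION & SPEC =====
def Spec_Alpha_After_Digits (s : String) (out : Bool) : Prop := out = Alpha_After_Digits_alt s
instance (s : String) (out : Bool) : Decidable (Spec_Alpha_After_Digits s out) := by unfold Spec_Alpha_After_Digits; infer_instance

-- ===== CLAIM (what is proved, stated in full; the proofs are below) =====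
def Claim_equal_Alpha_After_Digits : Prop := ∀ (s : String), Dom_Alpha_After_Digits s → Spec_Alpha_After_Digits s (Alpha_After_Digits s)

-- ===== LEMMAS AND PROOFS =====

theorem pv_digit_not_alpha (c : Char) (h : PySem.Chars.isdigit c = true) :
    PySem.Chars.isalpha c = false := by
  simp only [PySem.Chars.isdigit, Char.le_def, Bool.and_eq_true, decide_eq_true_eq,
    PySem.Chars.isalpha, PySem.Chars.isupper, PySem.Chars.islower, Bool.or_eq_false_iff,
    Bool.and_eq_false_imp, decide_eq_false_iff_not, UInt32.not_le] at *
  simp only [UInt32.le_iff_toNat_le, UInt32.lt_iff_toNat_lt,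
    (by decide : ('0':Char).val.toNat = 48), (by decide : ('9':Char).val.toNat = 57),
    (by decide : ('A':Char).val.toNat = 65), (by decide : ('Z':Char).val.toNat = 90),
    (by decide : ('a':Char).val.toNat = 97), (by decide : ('z':Char).val.toNat = 122)] at *
  omega

def pvTagsL (l : List Char) : List Bool :=
  (l.filter (fun c => PySem.Chars.isalpha c || PySem.Chars.isdigit c)).map
    (fun c => PySem.Chars.isdigit c)

-- a nondecreasing Bool list whose head is true is all-true, and conversely
theorem pv_allTrue_pairwise (t : List Bool) (h : ∀ b ∈ t, b = true) :
    t.Pairwise (fun a b => a ≤ b) := by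
  induction t with
  | nil => exact List.Pairwise.nil
  | cons b rest ih =>
    refine List.Pairwise.cons (fun x hx => ?_) (ih (fun x hx => h x (List.mem_cons_of_mem _ hx)))
    rw [h b List.mem_cons_self, h x (List.mem_cons_of_mem _ hx)]

theorem pvGoA_true (l : List Char) :
    pvGoA l true = decide (∀ b ∈ pvTagsL l, b = true) := by
  induction l with
  | nil => simp [pvGoA, pvTagsL]
  | cons c rest ih =>
    by_cases hd : PySem.Chars.isdigit c = true
    · simp [pvGoA, hd, pvTagsL, pv_digit_not_alpha c hd, ih]
    · by_cases ha : PySem.Chars.isalpha c = true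
      · simp [pvGoA, hd, ha, pvTagsL]
      · simp at hd ha
        simp [pvGoA, hd, ha, pvTagsL, ih]

theorem pvGoA_false (l : List Char) :
    pvGoA l false = decide ((pvTagsL l).Pairwise (fun a b => a ≤ b)) := by
  induction l with
  | nil => simp [pvGoA, pvTagsL]
  | cons c rest ih =>
    by_cases hd : PySem.Chars.isdigit c = true
    · simp only [pvGoA, hd, if_true, pvGoA_true, pvTagsL, List.filter_cons,
        pv_digit_not_alpha c hd, Bool.false_or, List.map_cons, List.pairwise_cons]
      by_cases h : ∀ b ∈ pvTagsL rest, b = true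
      · simp only [pvTagsL] at h
        have hp := pv_allTrue_pairwise _ h
        rw [decide_eq_decide]
        exact ⟨fun _ => ⟨fun b hb => by rw [h b hb], hp⟩, fun _ => h⟩
      · simp only [pvTagsL] at h
        push Not at h
        obtain ⟨b, hb, hbf⟩ := h
        have hb' : b = false := by cases b <;> simp_all
        subst hb'
        rw [decide_eq_decide]
        constructor
        · intro hall
          exact absurd (hall false hb) (by simp)
        · intro ⟨h1, _⟩
          exact absurd (h1 false hb) (by decide)
    · have hdf : PySem.Chars.isdigit c = false := by simpa using hd
      by_cases ha : PySem.Chars.isalpha c = true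
      · simp [pvGoA, hdf, ha, pvTagsL, List.pairwise_cons, Bool.false_le, ih]
      · have haf : PySem.Chars.isalpha c = false := by simpa using ha
        simp [pvGoA, hdf, haf, pvTagsL, ih]

theorem pv_sorted_eq_iff (t : List Bool) :
    (t == PySem.List.sorted t (fun b => b) false) =
      decide (t.Pairwise (fun a b => a ≤ b)) := by
  by_cases hp : t.Pairwise (fun a b => a ≤ b)
  · rw [PySem.List.sorted_eq_self_of_pairwise _ _ hp]
    simp [hp]
  · have hs := PySem.List.sorted_pairwise t (fun b => b) (κ := Bool)
    have : t ≠ PySem.List.sorted t (fun b => b) false := by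
      intro h
      rw [h] at hp
      exact hp hs
    simp [this, hp]

-- ===== VERDICT (by name: the statement is the Claim_ definition above) =====
theorem Alpha_After_Digits_spec : Claim_equal_Alpha_After_Digits := by
  intro s _
  unfold Spec_Alpha_After_Digits Alpha_After_Digits Alpha_After_Digits_alt
  show pvGoA s.toList false = (pvTagsL s.toList == PySem.List.sorted (pvTagsL s.toList) (fun b => b) false)
  rw [pvGoA_false, pv_sorted_eq_iff]
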